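-- pv_equiv track=rewrite | github.com/kcortes133/Assignment_4 | fileParsing.py | makeNetwork
-- ===== SOURCE A (Python) =====
-- import operator
-- from functools import reduce
--
-- def makeNetwork(genes, interactionsNetwork):
--     geneInteractions = {}
--     genes = reduce(operator.add, genes)
--     for gene1 in genes:
--         # input gene1 check if connected to any other gene
--         geneInteractions[gene1] = {}
--         if gene1 in interactionsNetwork:
--             for gene2 in genes:
--                 if gene2 in interactionsNetwork[gene1]:
--                     if gene2 in genes:
--                         # make sure not to duplicate edges
--                         #if gene1 not in geneInteractions[gene2]:
--                         geneInteractions[gene1][gene2] = interactionsNetwork[gene1][gene2]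
--     return geneInteractions
-- ===== SOURCE B (Python) =====
-- def makeNetwork(genes, interactionsNetwork):
--     flat = [g for sub in genes for g in sub]
--     index = {}
--     for i, g in enumerate(flat):
--         if g not in index:
--             index[g] = i
--     result = {}
--     for gene1 in flat:
--         if gene1 in interactionsNetwork:
--             nbrs = interactionsNetwork[gene1]
--             keep = sorted((g2 for g2 in nbrs if g2 in index), key=lambda g2: index[g2])
--             result[gene1] = {g2: nbrs[g2] for g2 in keep}
--         else:
--             result[gene1] = {}
--     return result
-- ===== Notes on version B (the rewrite author's own statement) =====
-- stated objective: faster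
-- what changed: A flattens with reduce and, for every gene, rescans the whole flattened gene list with an extra redundant list-membership scan per pair (O(n^3) worst case); B builds a first-occurrence index dict once and, per gene, walks only that gene's own neighbour dict, keeping neighbours that are genes and ordering them by first-occurrence index with one sort.
import Mathlib
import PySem

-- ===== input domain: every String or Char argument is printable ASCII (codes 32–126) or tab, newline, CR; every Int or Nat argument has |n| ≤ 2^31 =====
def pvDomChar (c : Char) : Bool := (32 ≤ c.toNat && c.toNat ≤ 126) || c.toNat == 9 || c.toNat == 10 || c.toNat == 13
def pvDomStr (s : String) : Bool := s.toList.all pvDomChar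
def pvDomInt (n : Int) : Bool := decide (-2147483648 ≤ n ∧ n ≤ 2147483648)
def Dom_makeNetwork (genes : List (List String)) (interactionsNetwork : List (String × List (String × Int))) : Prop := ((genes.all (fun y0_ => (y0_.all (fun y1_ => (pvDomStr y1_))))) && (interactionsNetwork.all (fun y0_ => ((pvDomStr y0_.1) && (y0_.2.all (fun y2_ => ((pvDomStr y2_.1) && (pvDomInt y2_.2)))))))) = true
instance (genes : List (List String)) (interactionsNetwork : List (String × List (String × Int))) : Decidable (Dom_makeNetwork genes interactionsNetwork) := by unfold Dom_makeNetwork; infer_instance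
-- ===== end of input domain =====

-- B replaces A's reduce + triple nested scan (for each gene pair, a list-membership scan over the
-- flattened gene list) by one first-occurrence index built once and, per gene, a scan of that gene's
-- own neighbour dict sorted by first-occurrence index; same return value on Pre_ (asymptotically faster).

-- ===== PORT A =====
def makeNetwork (genes : List (List String)) (interactionsNetwork : List (String × List (String × Int))) : List (String × List (String × Int)) :=
  match genes with
  | [] => []   -- Python: reduce(operator.add, []) raises TypeError; excluded by Pre_
  | g0 :: gs =>
    let net : PySem.Dict String (List (String × Int)) := PySem.Dict.mk interactionsNetwork
    -- genes = reduce(operator.add, genes)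
    let flat : List String := gs.foldl (fun acc x => acc ++ x) g0
    let res : PySem.Dict String (PySem.Dict String Int) :=
      flat.foldl (fun d g1 =>
        -- geneInteractions[gene1] = {}
        let d1 := d.insert g1 PySem.Dict.empty
        if net.contains g1 then
          let nbrs : PySem.Dict String Int := PySem.Dict.mk (net.getD g1 [])
          flat.foldl (fun d g2 =>
            if nbrs.contains g2 then
              if g2 ∈ flat then
                d.insert g1 ((d.getD g1 PySem.Dict.empty).insert g2 (nbrs.getD g2 0))
              else d
            else d) d1
        else d1) PySem.Dict.empty
    res.items.map (fun p => (p.1, p.2.items))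

-- ===== PORT B =====
def makeNetwork_alt (genes : List (List String)) (interactionsNetwork : List (String × List (String × Int))) : List (String × List (String × Int)) :=
  let flat : List String := genes.flatten
  -- index = {} ; for i, g in enumerate(flat): if g not in index: index[g] = i
  let index : PySem.Dict String Int :=
    (PySem.List.enumerate flat).foldl
      (fun d p => if d.contains p.2 then d else d.insert p.2 p.1) PySem.Dict.empty
  let net : PySem.Dict String (List (String × Int)) := PySem.Dict.mk interactionsNetwork
  let res : PySem.Dict String (PySem.Dict String Int) :=
    flat.foldl (fun d g1 =>
      if net.contains g1 then
        let nbrs : PySem.Dict String Int := PySem.Dict.mk (net.getD g1 [])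
        let keep : List String :=
          PySem.List.sorted (nbrs.keys.filter (fun g2 => index.contains g2))
            (fun g2 => index.getD g2 0)
        d.insert g1 (keep.foldl (fun inner g2 => inner.insert g2 (nbrs.getD g2 0)) PySem.Dict.empty)
      else d.insert g1 PySem.Dict.empty) PySem.Dict.empty
  res.items.map (fun p => (p.1, p.2.items))

-- ===== PRECONDITION & SPEC =====
-- Pre_ excludes genes = [] (reduce of an empty sequence: Python A raises TypeError), and requires the
-- association lists standing for the inner Python dicts to have distinct keys (a Python dict cannot
-- carry duplicate keys, so this excludes no Python input).
def Pre_makeNetwork (genes : List (List String)) (interactionsNetwork : List (String × List (String × Int))) : Prop :=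
  genes ≠ [] ∧ ∀ p ∈ interactionsNetwork, (p.2.map Prod.fst).Nodup
instance (genes : List (List String)) (interactionsNetwork : List (String × List (String × Int))) : Decidable (Pre_makeNetwork genes interactionsNetwork) := by unfold Pre_makeNetwork; infer_instance
def pvWitness_makeNetwork : List (List String) × (List (String × List (String × Int))) :=
  ([["a", "b"], ["c"]], [("a", [("b", 2), ("c", 3)]), ("d", [("a", 1)])])

def Spec_makeNetwork (genes : List (List String)) (interactionsNetwork : List (String × List (String × Int))) (out : List (String × List (String × Int))) : Prop := out = makeNetwork_alt genes interactionsNetwork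
instance (genes : List (List String)) (interactionsNetwork : List (String × List (String × Int))) (out : List (String × List (String × Int))) : Decidable (Spec_makeNetwork genes interactionsNetwork out) := by unfold Spec_makeNetwork; infer_instance

-- ===== CLAIM (what is proved, stated in full; the proofs are below) =====
def Claim_equal_makeNetwork : Prop := ∀ (genes : List (List String)) (interactionsNetwork : List (String × List (String × Int))), Dom_makeNetwork genes interactionsNetwork → Pre_makeNetwork genes interactionsNetwork → Spec_makeNetwork genes interactionsNetwork (makeNetwork genes interactionsNetwork)

-- ===== LEMMAS AND PROOFS =====

-- Writing into a single outer key g1 over a whole loop is one outer insert of the inner loop's dict.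
lemma fold_inner_hoist (l : List String) (g1 : String) (P : String → Bool) (v : String → Int)
    (d : PySem.Dict String (PySem.Dict String Int)) (inner0 : PySem.Dict String Int) :
    l.foldl (fun d g2 => if P g2 then
        d.insert g1 ((d.getD g1 PySem.Dict.empty).insert g2 (v g2)) else d) (d.insert g1 inner0)
    = d.insert g1 (l.foldl (fun inner g2 => if P g2 then inner.insert g2 (v g2) else inner) inner0) := by
  induction l generalizing inner0 with
  | nil => rfl
  | cons x t ih =>
    by_cases h : P x = true
    · simp only [List.foldl_cons, h, if_true, PySem.Dict.getD_insert_self,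
        PySem.Dict.insert_insert_self, ih]
    · simp [h, ih]

lemma idxOf_cons_ne' (x g : String) (t : List String) (h : g ≠ x) :
    (x :: t).idxOf g = t.idxOf g + 1 := by
  rw [List.idxOf_cons]
  have hb : (x == g) = false := beq_eq_false_iff_ne.mpr (fun he => h he.symm)
  simp [hb]

-- A fold of inserts whose value depends only on the key builds the dict of first occurrences.
lemma foldl_insert_mk (f : String → Int) :
    ∀ (L S : List String), S.Nodup →
    L.foldl (fun d k => d.insert k (f k)) (PySem.Dict.mk (S.map (fun k => (k, f k))))
    = PySem.Dict.mk ((L.foldl PySem.Set.add S).map (fun k => (k, f k))) := by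
  intro L
  induction L with
  | nil => intro S _; rfl
  | cons k t ih =>
    intro S hS
    have hkeys : (PySem.Dict.mk (S.map (fun k => (k, f k)))).keys = S := by
      simp [PySem.Dict.keys_mk, List.map_map, Function.comp_def]
    have hmem : (PySem.Dict.mk (S.map (fun k => (k, f k)))).contains k = true ↔ k ∈ S := by
      rw [PySem.Dict.contains_iff_mem_keys, hkeys]
    simp only [List.foldl_cons]
    by_cases h : k ∈ S
    · have hins : (PySem.Dict.mk (S.map (fun k => (k, f k)))).insert k (f k)
          = PySem.Dict.mk (S.map (fun k => (k, f k))) := by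
        apply PySem.Dict.ext
        rw [PySem.Dict.items_insert_of_contains _ _ (hmem.mpr h)]
        show (S.map _).map _ = S.map _
        rw [List.map_map]
        apply List.map_congr_left
        intro s _
        by_cases hsk : s = k
        · subst hsk; simp
        · simp [Function.comp, hsk]
      have hadd : PySem.Set.add S k = S := by simp [PySem.Set.add, h]
      rw [hins, hadd]
      exact ih S hS
    · have hins : (PySem.Dict.mk (S.map (fun k => (k, f k)))).insert k (f k)
          = PySem.Dict.mk ((S ++ [k]).map (fun k => (k, f k))) := by
        apply PySem.Dict.ext
        rw [PySem.Dict.items_insert_of_not_contains _ _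
          (by rw [Bool.eq_false_iff]; intro hc; exact h (hmem.mp hc))]
        simp
      have hadd : PySem.Set.add S k = S ++ [k] := by simp [PySem.Set.add, h]
      rw [hins, hadd]
      exact ih (S ++ [k]) (by
        simp [List.nodup_append, hS]
        exact fun a ha hak => h (hak ▸ ha))

lemma foldl_insert_ofList (f : String → Int) (L : List String) :
    L.foldl (fun d k => d.insert k (f k)) PySem.Dict.empty
    = PySem.Dict.mk ((PySem.Set.ofList L).map (fun k => (k, f k))) := by
  simpa using foldl_insert_mk f L [] List.nodup_nil

-- the index dict: get? is the first-occurrence position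
lemma idx_get? (g : String) :
    ∀ (l : List String) (n : Int) (d : PySem.Dict String Int),
    ((PySem.List.enumerate l n).foldl
        (fun d p => if d.contains p.2 then d else d.insert p.2 p.1) d).get? g
    = if d.contains g then d.get? g else if g ∈ l then some (n + l.idxOf g) else none := by
  intro l
  induction l with
  | nil =>
    intro n d
    by_cases h : d.contains g = true
    · simp [PySem.List.enumerate, h]
    · simp [PySem.List.enumerate, h,
        (PySem.Dict.get?_eq_none_iff_contains d g).mpr (by simpa using h)]
  | cons x t ih =>
    intro n d
    rw [PySem.List.enumerate_cons]
    simp only [List.foldl_cons]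
    by_cases hdx : d.contains x = true
    · rw [if_pos hdx, ih]
      by_cases hdg : d.contains g = true
      · simp [hdg]
      · have hgx : g ≠ x := fun he => hdg (he ▸ hdx)
        have hidx : (x :: t).idxOf g = t.idxOf g + 1 := idxOf_cons_ne' x g t hgx
        by_cases hgt : g ∈ t
        · have hmem : g ∈ x :: t := List.mem_cons_of_mem _ hgt
          simp only [hdg, hgt, if_true, hmem, hidx]
          congr 1
          push_cast
          ring
        · have hmem : ¬ g ∈ x :: t := by
            simp [List.mem_cons, hgx, hgt]
          simp [hdg, hgt, hmem]
    · rw [if_neg hdx, ih]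
      by_cases hgx : g = x
      · subst hgx
        have h1 : (d.insert g n).contains g = true := PySem.Dict.contains_insert_self d g n
        have hdg : d.contains g = false := by rwa [Bool.eq_false_iff]
        simp [h1, PySem.Dict.get?_insert_self, hdg, List.idxOf_cons_self]
      · have h1 : (d.insert x n).contains g = d.contains g := by
          rw [PySem.Dict.contains_insert]
          simp [hgx]
        have h2 : (d.insert x n).get? g = d.get? g := PySem.Dict.get?_insert_of_ne d n hgx
        rw [h1, h2]
        by_cases hdg : d.contains g = true
        · simp [hdg]
        · have hidx : (x :: t).idxOf g = t.idxOf g + 1 := idxOf_cons_ne' x g t hgx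
          by_cases hgt : g ∈ t
          · have hmem : g ∈ x :: t := List.mem_cons_of_mem _ hgt
            simp only [hdg, hgt, if_true, hmem, hidx]
            congr 1
            push_cast
            ring
          · have hmem : ¬ g ∈ x :: t := by
              simp [List.mem_cons, hgx, hgt]
            simp [hdg, hgt, hmem]

lemma idx_contains (l : List String) (g : String) :
    ((PySem.List.enumerate l).foldl
        (fun d p => if d.contains p.2 then d else d.insert p.2 p.1) PySem.Dict.empty).contains g
    = decide (g ∈ l) := by
  rw [PySem.Dict.contains_eq_isSome_get?, idx_get? g l 0 PySem.Dict.empty]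
  by_cases h : g ∈ l <;> simp [h]

lemma idx_getD (l : List String) (g : String) (h : g ∈ l) :
    ((PySem.List.enumerate l).foldl
        (fun d p => if d.contains p.2 then d else d.insert p.2 p.1) PySem.Dict.empty).getD g 0
    = (l.idxOf g : Int) := by
  rw [PySem.Dict.getD, idx_get? g l 0 PySem.Dict.empty]
  simp [h]

-- first-occurrence order of the (filtered) elements is strictly increasing in first index
lemma ofList_filter_pairwise (p : String → Bool) :
    ∀ (l : List String),
    (PySem.Set.ofList (l.filter p)).Pairwise (fun a b => l.idxOf a < l.idxOf b) := by
  intro l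
  induction l with
  | nil => simp [PySem.Set.ofList, PySem.Set.empty]
  | cons x t ih =>
    have hmem_p : ∀ b ∈ PySem.Set.ofList (t.filter p), p b = true := by
      intro b hb
      have := (PySem.Set.mem_ofList _ _).mp hb
      exact (List.mem_filter.mp this).2
    by_cases hp : p x = true
    · rw [List.filter_cons_of_pos hp, PySem.Set.ofList_cons]
      refine List.pairwise_cons.mpr ⟨?_, ?_⟩
      · intro b hb
        have hb' := List.mem_filter.mp hb
        have hbx : b ≠ x := by
          have := hb'.2
          simpa using this
        rw [idxOf_cons_ne' x b t hbx, List.idxOf_cons_self]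
        omega
      · have hsub : (PySem.Set.discard (PySem.Set.ofList (t.filter p)) x).Sublist
            (PySem.Set.ofList (t.filter p)) := by
          simp only [PySem.Set.discard]
          exact List.filter_sublist
        refine (ih.sublist hsub).imp_of_mem ?_
        intro a b ha hb hr
        have hax : a ≠ x := by
          have := (List.mem_filter.mp ha).2
          simpa using this
        have hbx : b ≠ x := by
          have := (List.mem_filter.mp hb).2
          simpa using this
        rw [idxOf_cons_ne' x a t hax, idxOf_cons_ne' x b t hbx]
        omega
    · rw [List.filter_cons_of_neg (by simpa using hp)]
      refine ih.imp_of_mem ?_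
      intro a b ha hb hr
      have hax : a ≠ x := fun he => hp (he ▸ hmem_p a ha)
      have hbx : b ≠ x := fun he => hp (he ▸ hmem_p b hb)
      rw [idxOf_cons_ne' x a t hax, idxOf_cons_ne' x b t hbx]
      omega

-- the heart: first-occurrence dedup of flat filtered by dict membership
-- equals the dict's keys filtered to flat, sorted by first-occurrence index
lemma ofList_filter_eq_sorted (flat : List String) (nbrs : PySem.Dict String Int)
    (hkeys : nbrs.keys.Nodup) :
    PySem.Set.ofList (flat.filter (fun g => nbrs.contains g))
    = PySem.List.sorted
        (nbrs.keys.filter (fun g2 =>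
          ((PySem.List.enumerate flat).foldl
            (fun d p => if d.contains p.2 then d else d.insert p.2 p.1) PySem.Dict.empty).contains g2))
        (fun g2 =>
          ((PySem.List.enumerate flat).foldl
            (fun d p => if d.contains p.2 then d else d.insert p.2 p.1) PySem.Dict.empty).getD g2 0) := by
  refine (PySem.List.sorted_eq_of_perm_of_pairwise_lt _ _ _ ?_ ?_).symm
  · refine (List.perm_ext_iff_of_nodup (PySem.Set.nodup_ofList _) (hkeys.filter _)).mpr ?_
    intro a
    rw [PySem.Set.mem_ofList]
    simp only [List.mem_filter, idx_contains, decide_eq_true_iff]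
    rw [← PySem.Dict.contains_iff_mem_keys]
    tauto
  · refine (ofList_filter_pairwise (fun g => nbrs.contains g) flat).imp_of_mem ?_
    intro a b ha hb hr
    have ha' : a ∈ flat := (List.mem_filter.mp ((PySem.Set.mem_ofList _ _).mp ha)).1
    have hb' : b ∈ flat := (List.mem_filter.mp ((PySem.Set.mem_ofList _ _).mp hb)).1
    rw [idx_getD flat a ha', idx_getD flat b hb']
    exact_mod_cast hr

-- ===== VERDICT (by name: the statement is the Claim_ definition above) =====
theorem makeNetwork_spec : Claim_equal_makeNetwork := by
  intro genes inet _ hpre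
  obtain ⟨hne, hnodup⟩ := hpre
  unfold Spec_makeNetwork
  cases genes with
  | nil => exact absurd rfl hne
  | cons g0 gs =>
    unfold makeNetwork makeNetwork_alt
    dsimp only
    rw [PySem.List.foldl_append_eq_flatten, ← List.flatten_cons]
    congr 1
    congr 1
    apply PySem.List.foldl_congr_mem
    intro d g1 hg1
    by_cases hnetc : (PySem.Dict.mk inet).contains g1 = true
    · simp only [hnetc, if_true]
      cases hf : List.find? (fun p => p.1 == g1) inet with
      | none =>
        exfalso
        have hnone : (PySem.Dict.mk inet).get? g1 = none := by
          simp [PySem.Dict.get?, hf]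
        rw [PySem.Dict.get?_eq_none_iff_contains] at hnone
        rw [hnetc] at hnone
        exact absurd hnone (by simp)
      | some q =>
        have hq2 : (PySem.Dict.mk inet).getD g1 [] = q.2 := by
          simp [PySem.Dict.getD, PySem.Dict.get?, hf]
        have hqmem : q ∈ inet := List.mem_of_find?_eq_some hf
        have hkeysnd : (PySem.Dict.mk ((PySem.Dict.mk inet).getD g1 [])).keys.Nodup := by
          rw [hq2, PySem.Dict.keys_mk]
          exact hnodup q hqmem
        set flat := (g0 :: gs).flatten with hfl
        set nbrs := PySem.Dict.mk ((PySem.Dict.mk inet).getD g1 []) with hnb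
        rw [PySem.List.foldl_congr_mem flat
          (fun d g2 => if nbrs.contains g2 = true then
              if g2 ∈ flat then
                d.insert g1 ((d.getD g1 PySem.Dict.empty).insert g2 (nbrs.getD g2 0))
              else d
            else d)
          (fun d g2 => if nbrs.contains g2 = true then
              d.insert g1 ((d.getD g1 PySem.Dict.empty).insert g2 (nbrs.getD g2 0))
            else d)
          (d.insert g1 PySem.Dict.empty)
          (by
            intro acc x hx
            by_cases hc : nbrs.contains x = true <;> simp [hc, hx])]
        rw [fold_inner_hoist flat g1 (fun g2 => nbrs.contains g2)
          (fun g2 => nbrs.getD g2 0) d PySem.Dict.empty]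
        rw [PySem.List.foldl_if_eq_foldl_filter (fun g2 => nbrs.contains g2)
          (fun inner g2 => inner.insert g2 (nbrs.getD g2 0)) flat PySem.Dict.empty]
        have hsort := ofList_filter_eq_sorted flat nbrs hkeysnd
        have hkeepnd := hsort ▸ PySem.Set.nodup_ofList (flat.filter (fun g => nbrs.contains g))
        rw [foldl_insert_ofList, foldl_insert_ofList, hsort,
          PySem.Set.ofList_eq_self_of_nodup _ hkeepnd]
    · simp only [hnetc, Bool.false_eq_true, if_false]
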